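-- pv_equiv track=rewrite | github.com/lyst/lightfm | lightfm/datasets/movielens.py | _get_dimensions
-- ===== SOURCE A (Python) =====
-- import itertools
--
-- def _get_dimensions(train_data, test_data):
--
--     uids = set()
--     iids = set()
--
--     for uid, iid, _, _ in itertools.chain(train_data,
--                                           test_data):
--         uids.add(uid)
--         iids.add(iid)
--
--     rows = max(uids) + 1
--     cols = max(iids) + 1
--
--     return rows, cols
-- ===== SOURCE B (Python) =====
-- def _get_dimensions(train_data, test_data):
--     rows_max = None
--     cols_max = None
--
--     for uid, iid, _, _ in train_data:
--         if rows_max is None or uid > rows_max: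
--             rows_max = uid
--         if cols_max is None or iid > cols_max:
--             cols_max = iid
--     for uid, iid, _, _ in test_data:
--         if rows_max is None or uid > rows_max:
--             rows_max = uid
--         if cols_max is None or iid > cols_max:
--             cols_max = iid
--
--     if rows_max is None:
--         raise ValueError("empty interaction data")
--
--     return rows_max + 1, cols_max + 1
-- ===== Notes on version B (the rewrite author's own statement) =====
-- stated objective: simpler
-- what changed: Replaces the two accumulated id sets plus a final max() over each with two scalar running maxima updated in a single pass, using O(1) extra memory instead of O(n).
import Mathlib
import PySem

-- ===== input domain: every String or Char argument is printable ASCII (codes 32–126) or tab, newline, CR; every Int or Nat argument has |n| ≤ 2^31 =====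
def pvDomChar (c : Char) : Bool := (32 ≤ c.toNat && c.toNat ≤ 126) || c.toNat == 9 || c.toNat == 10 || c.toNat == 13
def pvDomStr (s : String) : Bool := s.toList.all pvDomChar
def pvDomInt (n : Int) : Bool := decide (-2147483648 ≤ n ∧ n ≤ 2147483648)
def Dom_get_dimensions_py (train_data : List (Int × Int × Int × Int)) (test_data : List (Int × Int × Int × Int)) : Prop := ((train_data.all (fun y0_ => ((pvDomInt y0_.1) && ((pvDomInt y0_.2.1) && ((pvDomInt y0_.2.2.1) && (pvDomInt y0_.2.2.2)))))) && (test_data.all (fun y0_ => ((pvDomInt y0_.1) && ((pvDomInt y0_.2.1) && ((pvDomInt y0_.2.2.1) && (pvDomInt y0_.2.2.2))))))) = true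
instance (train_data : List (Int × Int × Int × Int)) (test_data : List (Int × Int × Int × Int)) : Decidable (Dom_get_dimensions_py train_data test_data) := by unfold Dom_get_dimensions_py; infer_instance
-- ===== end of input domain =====

-- B replaces A's two accumulated id sets (+ final max over each) with two scalar running maxima in O(1) extra space; equivalence proved for nonempty input (A raises ValueError when both lists are empty).


-- ===== PORT A =====
-- one loop over chain(train, test) adding uid/iid to two sets, then max(set)+1 each
def get_dimensions_py (train_data : List (Int × Int × Int × Int)) (test_data : List (Int × Int × Int × Int)) : Int × Int :=
  let sets := (train_data ++ test_data).foldl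
    (fun (p : PySem.Set Int × PySem.Set Int) r => (PySem.Set.add p.1 r.1, PySem.Set.add p.2 r.2.1))
    (PySem.Set.empty, PySem.Set.empty)
  match PySem.List.max? sets.1 (fun x => x), PySem.List.max? sets.2 (fun x => x) with
  | some mu, some mi => (mu + 1, mi + 1)
  | _, _ => (0, 0)  -- unreachable under Pre_ (Python raises ValueError: max() of empty set)

-- ===== PORT B =====
-- running-maximum update: None -> the value, else keep the larger
def pvUpd (m : Option Int) (v : Int) : Option Int :=
  match m with
  | none => some v
  | some w => if v > w then some v else some w

-- two scalar running maxima, one pass over each list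
def get_dimensions_py_alt (train_data : List (Int × Int × Int × Int)) (test_data : List (Int × Int × Int × Int)) : Int × Int :=
  let p1 := train_data.foldl (fun (p : Option Int × Option Int) r => (pvUpd p.1 r.1, pvUpd p.2 r.2.1)) (none, none)
  let p2 := test_data.foldl (fun (p : Option Int × Option Int) r => (pvUpd p.1 r.1, pvUpd p.2 r.2.1)) p1
  match p2.1 with
  | none => (0, 0)  -- unreachable under Pre_ (Python raises ValueError)
  | some mu =>
    match p2.2 with
    | none => (0, 0)  -- unreachable under Pre_
    | some mi => (mu + 1, mi + 1)

-- ===== PRECONDITION & SPEC =====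
-- A raises ValueError (max() of an empty set) exactly when both lists are empty
def Pre_get_dimensions_py (train_data : List (Int × Int × Int × Int)) (test_data : List (Int × Int × Int × Int)) : Prop := train_data ++ test_data ≠ []
instance (train_data : List (Int × Int × Int × Int)) (test_data : List (Int × Int × Int × Int)) : Decidable (Pre_get_dimensions_py train_data test_data) := by unfold Pre_get_dimensions_py; infer_instance
def pvWitness_get_dimensions_py : (List (Int × Int × Int × Int)) × (List (Int × Int × Int × Int)) := ([(1, 2, 3, 4)], [])

def Spec_get_dimensions_py (train_data : List (Int × Int × Int × Int)) (test_data : List (Int × Int × Int × Int)) (out : Int × Int) : Prop := out = get_dimensions_py_alt train_data test_data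
instance (train_data : List (Int × Int × Int × Int)) (test_data : List (Int × Int × Int × Int)) (out : Int × Int) : Decidable (Spec_get_dimensions_py train_data test_data out) := by unfold Spec_get_dimensions_py; infer_instance

-- ===== CLAIM (what is proved, stated in full; the proofs are below) =====
def Claim_equal_get_dimensions_py : Prop := ∀ (train_data : List (Int × Int × Int × Int)) (test_data : List (Int × Int × Int × Int)), Dom_get_dimensions_py train_data test_data → Pre_get_dimensions_py train_data test_data → Spec_get_dimensions_py train_data test_data (get_dimensions_py train_data test_data)

-- ===== LEMMAS AND PROOFS =====

-- A's fold over the pair of sets splits into the two component folds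
theorem pv_split_A (L : List (Int × Int × Int × Int)) (a b : PySem.Set Int) :
    L.foldl (fun (p : PySem.Set Int × PySem.Set Int) r => (PySem.Set.add p.1 r.1, PySem.Set.add p.2 r.2.1)) (a, b)
      = (L.foldl (fun s r => PySem.Set.add s r.1) a, L.foldl (fun s r => PySem.Set.add s r.2.1) b) := by
  induction L generalizing a b with
  | nil => rfl
  | cons x t ih => simp [List.foldl_cons, ih]

-- B's fold over the pair of running maxima splits into the two component folds
theorem pv_split_B (L : List (Int × Int × Int × Int)) (a b : Option Int) :
    L.foldl (fun (p : Option Int × Option Int) r => (pvUpd p.1 r.1, pvUpd p.2 r.2.1)) (a, b)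
      = (L.foldl (fun m r => pvUpd m r.1) a, L.foldl (fun m r => pvUpd m r.2.1) b) := by
  induction L generalizing a b with
  | nil => rfl
  | cons x t ih => simp [List.foldl_cons, ih]

-- one pvUpd step from a some-state is a max step
theorem pv_upd_some (a v : Int) : pvUpd (some a) v = some (max a v) := by
  simp only [pvUpd]
  split_ifs with h
  · rw [max_eq_right h.le]
  · rw [max_eq_left (not_lt.mp h)]

-- pvUpd from a some-state is the running max
theorem pv_foldl_upd_some (us : List Int) (a : Int) :
    us.foldl pvUpd (some a) = some (us.foldl max a) := by
  induction us generalizing a with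
  | nil => rfl
  | cons v t ih => rw [List.foldl_cons, pv_upd_some, ih, List.foldl_cons]

-- B's running maximum over a nonempty list
theorem pv_foldl_upd_cons (x : Int) (t : List Int) :
    (x :: t).foldl pvUpd none = some (t.foldl max x) := by
  simp only [List.foldl_cons, pvUpd]
  exact pv_foldl_upd_some t x

-- deduplication does not change the maximum
theorem pv_max_ofList (x : Int) (t : List Int) :
    PySem.List.max? (PySem.Set.ofList (x :: t)) (fun y => y) = some (t.foldl max x) := by
  have hx : x ∈ PySem.Set.ofList (x :: t) := (PySem.Set.mem_ofList _ _).mpr (List.mem_cons_self)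
  have hne : PySem.Set.ofList (x :: t) ≠ [] := by
    intro h; rw [h] at hx; exact (List.not_mem_nil) hx
  rcases Option.ne_none_iff_exists'.mp
      (fun h => hne ((PySem.List.max?_eq_none_iff (PySem.Set.ofList (x :: t))
        (fun y : Int => y)).mp h)) with ⟨m, hm⟩
  have hlist : PySem.List.max? (x :: t) (fun y => y) = some (t.foldl max x) :=
    PySem.List.max?_id_cons x t
  have hmmem : m ∈ (x :: t) := (PySem.Set.mem_ofList _ _).mp (PySem.List.max?_mem hm)
  have hfmem : t.foldl max x ∈ PySem.Set.ofList (x :: t) :=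
    (PySem.Set.mem_ofList _ _).mpr (PySem.List.max?_mem hlist)
  have h1 : m ≤ t.foldl max x := PySem.List.max?_isMax hlist m hmmem
  have h2 : t.foldl max x ≤ m := PySem.List.max?_isMax hm _ hfmem
  rw [hm, le_antisymm h1 h2]

-- ===== VERDICT (by name: the statement is the Claim_ definition above) =====
theorem get_dimensions_py_spec : Claim_equal_get_dimensions_py := by
  intro train test _ hpre
  unfold Spec_get_dimensions_py
  unfold Pre_get_dimensions_py at hpre
  simp only [get_dimensions_py, get_dimensions_py_alt, ← List.foldl_append]
  set L := train ++ test with hL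
  clear_value L
  rw [pv_split_A, pv_split_B]
  have h1 : L.foldl (fun s (r : Int × Int × Int × Int) => PySem.Set.add s r.1) PySem.Set.empty
      = PySem.Set.ofList (L.map (·.1)) := by
    rw [PySem.Set.ofList_eq_foldl, List.foldl_map]; rfl
  have h2 : L.foldl (fun s (r : Int × Int × Int × Int) => PySem.Set.add s r.2.1) PySem.Set.empty
      = PySem.Set.ofList (L.map (·.2.1)) := by
    rw [PySem.Set.ofList_eq_foldl, List.foldl_map]; rfl
  have h3 : L.foldl (fun m (r : Int × Int × Int × Int) => pvUpd m r.1) none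
      = (L.map (·.1)).foldl pvUpd none := by rw [List.foldl_map]
  have h4 : L.foldl (fun m (r : Int × Int × Int × Int) => pvUpd m r.2.1) none
      = (L.map (·.2.1)).foldl pvUpd none := by rw [List.foldl_map]
  rw [h1, h2, h3, h4]
  cases L with
  | nil => exact absurd rfl hpre
  | cons z t =>
    simp only [List.map_cons]
    rw [pv_foldl_upd_cons, pv_foldl_upd_cons, pv_max_ofList, pv_max_ofList]
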